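-- pv_equiv track=rewrite | github.com/moink/advent2022 | day18/day18.py | get_all_faces
-- ===== SOURCE A (Python) =====
-- def get_all_faces(data):
--     faces = [set() for _ in range(3)]
--     for line in data:
--         for i, face_set in enumerate(faces):
--             add_or_remove(face_set, tuple(line))
--             other_face = list(line)
--             other_face[i] += 1
--             add_or_remove(face_set, tuple(other_face))
--     return faces
--
-- def add_or_remove(faces, plane):
--     if plane in faces:
--         faces.remove(plane)
--     else:
--         faces.add(plane)
-- ===== SOURCE B (Python) =====
-- def get_all_faces(data):
--     faces = []
--     for i in range(3):
--         counts = {}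
--         for line in data:
--             plane = tuple(line)
--             counts[plane] = counts.get(plane, 0) + 1
--             shifted = list(line)
--             shifted[i] += 1
--             shifted = tuple(shifted)
--             counts[shifted] = counts.get(shifted, 0) + 1
--         faces.append({plane for plane, c in counts.items() if c % 2 == 1})
--     return faces
-- ===== Notes on version B (the rewrite author's own statement) =====
-- stated objective: simpler
-- what changed: A toggles each face in a per-axis set (add-or-remove) inside the main loop; B instead, per axis, counts every face occurrence in a plain dict in one pass and then builds the face set in a second pass as the keys with odd count (count-then-parity-filter decomposition).
import Mathlib
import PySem

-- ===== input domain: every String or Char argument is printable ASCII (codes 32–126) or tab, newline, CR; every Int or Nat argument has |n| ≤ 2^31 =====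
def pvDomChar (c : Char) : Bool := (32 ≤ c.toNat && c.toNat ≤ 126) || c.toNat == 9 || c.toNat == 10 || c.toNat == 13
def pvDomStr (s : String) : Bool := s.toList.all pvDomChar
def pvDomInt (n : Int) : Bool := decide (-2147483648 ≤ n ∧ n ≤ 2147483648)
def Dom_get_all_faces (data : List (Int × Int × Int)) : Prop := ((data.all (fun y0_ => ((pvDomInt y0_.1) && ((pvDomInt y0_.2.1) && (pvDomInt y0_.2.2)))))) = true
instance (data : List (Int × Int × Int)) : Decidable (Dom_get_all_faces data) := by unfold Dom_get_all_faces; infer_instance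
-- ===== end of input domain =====

-- B replaces A's inline set toggling by a two-phase count-then-parity-filter per axis (simpler decomposition, same cost).
-- NOTE on sets: Python's set iteration order is arbitrary and not modelled by PySem; each returned
-- set is represented (per the type convention) by the list of its distinct elements, here in
-- first-insertion order. Port A therefore models each Python set as a presence-flag Dict
-- (key ↦ currently-a-member?): 'plane in faces' is the flag lookup, remove/add set the flag,
-- and the final list keeps the keys whose flag is true — exactly the set A returns.

-- ===== PORT A =====
-- add_or_remove(faces, plane): if plane in faces: faces.remove(plane) else: faces.add(plane)
def pvAddOrRemove (faces : PySem.Dict (Int × Int × Int) Bool) (plane : Int × Int × Int) :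
    PySem.Dict (Int × Int × Int) Bool :=
  if faces.getD plane false then faces.insert plane false else faces.insert plane true

-- other_face = list(line); other_face[i] += 1; tuple(other_face)   (i is the enumerate index 0,1,2)
def pvOtherFace (line : Int × Int × Int) (i : Int) : Int × Int × Int :=
  if i = 0 then (line.1 + 1, line.2.1, line.2.2)
  else if i = 1 then (line.1, line.2.1 + 1, line.2.2)
  else (line.1, line.2.1, line.2.2 + 1)

-- read the modelled set back as its distinct elements (keys currently flagged as members)
def pvSetOf (d : PySem.Dict (Int × Int × Int) Bool) : List (Int × Int × Int) :=
  (d.items.filter (fun p => p.2)).map Prod.fst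

def get_all_faces (data : List (Int × Int × Int)) : List (List (Int × Int × Int)) :=
  -- faces = [set() for _ in range(3)]
  let faces : List (PySem.Dict (Int × Int × Int) Bool) :=
    [PySem.Dict.mk [], PySem.Dict.mk [], PySem.Dict.mk []]
  -- for line in data: for i, face_set in enumerate(faces): toggle line; toggle other_face
  let faces := data.foldl (fun fs line =>
    (PySem.List.enumerate fs).map (fun p =>
      pvAddOrRemove (pvAddOrRemove p.2 line) (pvOtherFace line p.1))) faces
  faces.map pvSetOf

-- ===== PORT B =====
-- shifted = list(line); shifted[i] += 1; tuple(shifted)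
def pvShift (i : Nat) (line : Int × Int × Int) : Int × Int × Int :=
  if i = 0 then (line.1 + 1, line.2.1, line.2.2)
  else if i = 1 then (line.1, line.2.1 + 1, line.2.2)
  else (line.1, line.2.1, line.2.2 + 1)

-- inner loop of B: counts[plane] = counts.get(plane, 0) + 1 for the face and its axis-i shift
def pvAxisCounts (i : Nat) (data : List (Int × Int × Int)) : PySem.Dict (Int × Int × Int) Int :=
  data.foldl (fun c line =>
    let c := c.insert line (c.getD line 0 + 1)
    let s := pvShift i line
    c.insert s (c.getD s 0 + 1)) (PySem.Dict.mk [])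

-- {plane for plane, c in counts.items() if c % 2 == 1}
def pvOddFaces (c : PySem.Dict (Int × Int × Int) Int) : List (Int × Int × Int) :=
  (c.items.filter (fun p => PySem.Int.mod p.2 2 == 1)).map Prod.fst

def get_all_faces_alt (data : List (Int × Int × Int)) : List (List (Int × Int × Int)) :=
  (List.range 3).map (fun i => pvOddFaces (pvAxisCounts i data))

-- ===== PRECONDITION & SPEC =====
def Spec_get_all_faces (data : List (Int × Int × Int)) (out : List (List (Int × Int × Int))) : Prop := out = get_all_faces_alt data
instance (data : List (Int × Int × Int)) (out : List (List (Int × Int × Int))) : Decidable (Spec_get_all_faces data out) := by unfold Spec_get_all_faces; infer_instance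

-- ===== CLAIM (what is proved, stated in full; the proofs are below) =====
def Claim_equal_get_all_faces : Prop := ∀ (data : List (Int × Int × Int)), Dom_get_all_faces data → Spec_get_all_faces data (get_all_faces data)

-- ===== LEMMAS AND PROOFS =====

-- parity of a count, as port B tests it
def pvOddb (v : Int) : Bool := PySem.Int.mod v 2 == 1

-- A's toggle dict is B's counter with each count replaced by its parity
def pvMapOdd (c : PySem.Dict (Int × Int × Int) Int) : PySem.Dict (Int × Int × Int) Bool :=
  PySem.Dict.mk (c.items.map (fun p => (p.1, pvOddb p.2)))

theorem pvOddb_succ (v : Int) : pvOddb (v + 1) = !pvOddb v := by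
  simp only [pvOddb, PySem.Int.mod_eq_emod_of_pos (by norm_num : (0:Int) < 2)]
  rcases Int.emod_two_eq v with h | h <;> simp [h] <;> omega

theorem pvMapOdd_getD (c : PySem.Dict (Int × Int × Int) Int) (k : Int × Int × Int) :
    (pvMapOdd c).getD k false = pvOddb (c.getD k 0) := by
  simp only [pvMapOdd, PySem.Dict.getD, PySem.Dict.get?, List.find?_map]
  have hpred : ((fun (p : (Int × Int × Int) × Bool) => p.1 == k) ∘
      fun (p : (Int × Int × Int) × Int) => (p.1, pvOddb p.2)) =
      (fun p => p.1 == k) := rfl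
  rw [hpred]
  cases List.find? (fun p => p.1 == k) c.items <;> simp [pvOddb, PySem.Int.mod]

theorem pvMapOdd_contains (c : PySem.Dict (Int × Int × Int) Int) (k : Int × Int × Int) :
    (pvMapOdd c).contains k = c.contains k := by
  simp only [pvMapOdd, PySem.Dict.contains, List.any_map]
  rfl

theorem pvInsert_mapOdd (c : PySem.Dict (Int × Int × Int) Int) (k : Int × Int × Int)
    (v : Int) (b : Bool) (hb : b = pvOddb v) :
    (pvMapOdd c).insert k b = pvMapOdd (c.insert k v) := by
  by_cases hc : c.contains k = true
  · have hc' : (pvMapOdd c).contains k = true := (pvMapOdd_contains c k).trans hc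
    simp only [PySem.Dict.insert]
    rw [if_pos hc', if_pos hc]
    simp only [pvMapOdd, List.map_map]
    refine congrArg PySem.Dict.mk (List.map_congr_left fun p _ => ?_)
    by_cases h : p.1 = k <;> simp [Function.comp, h, hb]
  · have hc' : ¬ (pvMapOdd c).contains k = true := fun h => hc ((pvMapOdd_contains c k).symm.trans h)
    simp only [PySem.Dict.insert]
    rw [if_neg hc', if_neg hc]
    simp [pvMapOdd, hb]

theorem pvToggle_eq (c : PySem.Dict (Int × Int × Int) Int) (k : Int × Int × Int) :
    pvAddOrRemove (pvMapOdd c) k = pvMapOdd (c.insert k (c.getD k 0 + 1)) := by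
  rw [pvAddOrRemove, pvMapOdd_getD]
  cases hb : pvOddb (c.getD k 0)
  · rw [if_neg (by simp)]
    exact pvInsert_mapOdd _ _ _ _ (by rw [pvOddb_succ, hb]; rfl)
  · rw [if_pos rfl]
    exact pvInsert_mapOdd _ _ _ _ (by rw [pvOddb_succ, hb]; rfl)

-- the whole per-axis loop: A's two toggles per line match B's two count increments per line
theorem pvAxis_eq (i : Int) (j : Nat) (hij : ∀ l, pvOtherFace l i = pvShift j l)
    (data : List (Int × Int × Int)) (c : PySem.Dict (Int × Int × Int) Int) :
    data.foldl (fun d line => pvAddOrRemove (pvAddOrRemove d line) (pvOtherFace line i)) (pvMapOdd c)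
      = pvMapOdd (data.foldl (fun c line =>
          let c := c.insert line (c.getD line 0 + 1)
          let s := pvShift j line
          c.insert s (c.getD s 0 + 1)) c) := by
  induction data generalizing c with
  | nil => rfl
  | cons line rest ih =>
    simp only [List.foldl]
    rw [pvToggle_eq, hij, pvToggle_eq]
    exact ih _

-- A's fold over the enumerated 3-list acts componentwise
theorem pvFold3 (data : List (Int × Int × Int))
    (a b c : PySem.Dict (Int × Int × Int) Bool) :
    data.foldl (fun fs line =>
        (PySem.List.enumerate fs).map (fun p =>
          pvAddOrRemove (pvAddOrRemove p.2 line) (pvOtherFace line p.1))) [a, b, c]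
      = [data.foldl (fun d line => pvAddOrRemove (pvAddOrRemove d line) (pvOtherFace line 0)) a,
         data.foldl (fun d line => pvAddOrRemove (pvAddOrRemove d line) (pvOtherFace line 1)) b,
         data.foldl (fun d line => pvAddOrRemove (pvAddOrRemove d line) (pvOtherFace line 2)) c] := by
  induction data generalizing a b c with
  | nil => rfl
  | cons line rest ih =>
    simp only [List.foldl, PySem.List.enumerate_cons, PySem.List.enumerate_nil, List.map]
    rw [ih]
    norm_num

-- reading back: A's member list of the parity dict = B's odd-count key list
theorem pvSetOf_mapOdd (c : PySem.Dict (Int × Int × Int) Int) :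
    pvSetOf (pvMapOdd c) = pvOddFaces c := by
  simp only [pvSetOf, pvOddFaces, pvMapOdd, List.filter_map, List.map_map]
  rfl

theorem pvShift_eq (j : Nat) (l : Int × Int × Int) : pvOtherFace l (j : Int) = pvShift j l := by
  rcases j with _ | _ | j
  · rfl
  · rfl
  · have h1 : ((j : Int) + 1 + 1) ≠ 0 := by omega
    have h2 : ((j : Int) + 1 + 1) ≠ 1 := by omega
    simp [pvOtherFace, pvShift, h1, h2]

-- ===== VERDICT (by name: the statement is the Claim_ definition above) =====
theorem get_all_faces_spec : Claim_equal_get_all_faces := by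
  intro data _
  show get_all_faces data = get_all_faces_alt data
  have hmk : pvMapOdd (PySem.Dict.mk []) = PySem.Dict.mk [] := rfl
  have haxis : ∀ j : Nat,
      data.foldl (fun d line => pvAddOrRemove (pvAddOrRemove d line) (pvOtherFace line (j : Int)))
        (PySem.Dict.mk []) = pvMapOdd (pvAxisCounts j data) := by
    intro j
    rw [← hmk]
    exact pvAxis_eq (j : Int) j (fun l => pvShift_eq j l) data _
  simp only [get_all_faces, get_all_faces_alt]
  rw [pvFold3]
  have h0 := haxis 0; have h1 := haxis 1; have h2 := haxis 2
  norm_num at h0 h1 h2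
  rw [h0, h1, h2]
  simp [List.range_succ, pvSetOf_mapOdd]
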